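-- pv_equiv track=rewrite | github.com/Kawser-nerd/CLCDSA | Source Codes/AtCoder/arc097/A/4759257.py | it
-- ===== SOURCE A (Python) =====
-- def it(s):
--     subs = sorted(s[i:] for i in range(len(s)))
--     writed = set()
--     for sub in subs:
--         for i in range(len(subs)):
--             w = sub[:i+1]
--             if w not in writed:
--                 yield w
--                 writed.add(w)
-- ===== SOURCE B (Python) =====
-- def it(s):
--     n = len(s)
--     subs = {s[i:j] for i in range(n) for j in range(i + 1, n + 1)}
--     yield from sorted(subs)
-- ===== Notes on version B (the rewrite author's own statement) =====
-- stated objective: simpler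
-- what changed: B enumerates all distinct substrings with a set comprehension and sorts them once, replacing A's suffix-sort followed by a nested prefix loop with a first-seen dedup set.
import Mathlib
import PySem

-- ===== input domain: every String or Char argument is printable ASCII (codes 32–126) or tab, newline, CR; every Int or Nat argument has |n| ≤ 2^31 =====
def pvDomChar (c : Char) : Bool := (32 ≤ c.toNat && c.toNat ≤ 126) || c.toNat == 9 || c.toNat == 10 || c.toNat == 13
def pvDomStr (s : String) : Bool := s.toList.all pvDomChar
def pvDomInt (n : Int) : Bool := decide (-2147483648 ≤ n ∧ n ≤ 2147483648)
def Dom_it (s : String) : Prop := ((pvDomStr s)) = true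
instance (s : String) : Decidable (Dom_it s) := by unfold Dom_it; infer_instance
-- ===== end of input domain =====

-- B enumerates all distinct substrings with one set comprehension and sorts them once, instead of
-- A's sorted-suffix scan with a nested prefix loop and a first-seen dedup set (objective: simpler).

-- ===== PORT A =====
def it (s : String) : List String :=
  let subs := PySem.List.sorted
    ((PySem.List.pyRange 0 (PySem.Str.len s)).map (fun i => PySem.Str.slice s (some i) none))
    (fun x => x)
  (subs.foldl (fun st sub =>
      (PySem.List.pyRange 0 ((subs.length : Nat) : Int)).foldl (fun st2 i =>
          if PySem.Set.contains st2.2 (PySem.Str.slice sub none (some (i + 1))) then st2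
          else (st2.1 ++ [PySem.Str.slice sub none (some (i + 1))],
                PySem.Set.add st2.2 (PySem.Str.slice sub none (some (i + 1))))) st)
    (([] : List String), (PySem.Set.empty : PySem.Set String))).1

-- ===== PORT B =====
def it_alt (s : String) : List String :=
  let n := PySem.Str.len s
  PySem.List.sorted
    (PySem.Set.ofList ((PySem.List.pyRange 0 n).flatMap (fun i =>
      (PySem.List.pyRange (i + 1) (n + 1)).map (fun j => PySem.Str.slice s (some i) (some j)))))
    (fun x => x)

-- ===== PRECONDITION & SPEC =====
def Spec_it (s : String) (out : List String) : Prop := out = it_alt s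
instance (s : String) (out : List String) : Decidable (Spec_it s out) := by unfold Spec_it; infer_instance

-- ===== CLAIM (what is proved, stated in full; the proofs are below) =====
def Claim_equal_it : Prop := ∀ (s : String), Dom_it s → Spec_it s (it s)

-- ===== LEMMAS AND PROOFS =====

/-- `s.toList.take m`, as a String: the value of Python's `sub[:m]` on our strings. -/
def strTake (s : String) (m : Nat) : String := String.ofList (s.toList.take m)

/-- `s.toList.drop k`, as a String: the value of Python's `s[k:]`. -/
def strDrop (s : String) (k : Nat) : String := String.ofList (s.toList.drop k)

theorem strTake_toList (s : String) (m : Nat) : (strTake s m).toList = s.toList.take m := by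
  simp [strTake]

theorem strDrop_toList (s : String) (k : Nat) : (strDrop s k).toList = s.toList.drop k := by
  simp [strDrop]

theorem slice_to_eq_strTake (s : String) (m : Nat) :
    PySem.Str.slice s none (some (m : Int)) = strTake s m := by
  apply String.toList_inj.mp
  simp [PySem.Str.toList_slice, PySem.Chars.slice_eq_listSlice, PySem.List.slice_to_natCast,
    strTake_toList]

theorem slice_from_eq_strDrop (s : String) (k : Nat) :
    PySem.Str.slice s (some (k : Int)) none = strDrop s k := by
  apply String.toList_inj.mp
  simp [PySem.Str.toList_slice, PySem.Chars.slice_eq_listSlice, PySem.List.slice_from_natCast,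
    strDrop_toList]

/-- Lexicographic dichotomy between takes of `≤`-ordered lists: a take of the smaller list is
either strictly below a take of the larger one, or the latter is a prefix of the former. -/
theorem take_dichotomy :
    ∀ (u v : List Char) (k m : Nat), u ≤ v →
      u.take k < v.take m ∨ v.take m <+: u.take k := by
  intro u v k m
  induction u generalizing v k m with
  | nil =>
    intro _
    cases m with
    | zero => exact Or.inr (by simp)
    | succ m' =>
      cases v with
      | nil => exact Or.inr (by simp)
      | cons c cs =>
        cases k with
        | zero => exact Or.inl (by simp only [List.take_nil, List.take_succ_cons]; exact List.nil_lt_cons c (cs.take m'))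
        | succ k' => exact Or.inl (by simp only [List.take_nil, List.take_succ_cons]; exact List.nil_lt_cons c (cs.take m'))
  | cons c' cs' ih =>
    intro hle
    cases v with
    | nil =>
      exfalso
      exact absurd (lt_of_lt_of_le (List.nil_lt_cons c' cs') hle) (lt_irrefl _)
    | cons c cs =>
      cases m with
      | zero => exact Or.inr (by simp)
      | succ m' =>
        cases k with
        | zero => exact Or.inl (by simp only [List.take_succ_cons]; exact List.nil_lt_cons c (cs.take m'))
        | succ k' =>
          simp only [List.take_succ_cons]
          rcases lt_or_eq_of_le hle with hlt | heq
          · rcases List.cons_lt_cons_iff.mp hlt with hc | ⟨hc, hrest⟩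
            · exact Or.inl (List.cons_lt_cons_iff.mpr (Or.inl hc))
            · subst hc
              rcases ih cs k' m' (le_of_lt hrest) with h | h
              · exact Or.inl (List.cons_lt_cons_iff.mpr (Or.inr ⟨rfl, h⟩))
              · exact Or.inr (List.cons_prefix_cons.mpr ⟨rfl, h⟩)
          · injection heq with h1 h2
            subst h1; subst h2
            rcases ih cs' k' m' le_rfl with h | h
            · exact Or.inl (List.cons_lt_cons_iff.mpr (Or.inr ⟨rfl, h⟩))
            · exact Or.inr (List.cons_prefix_cons.mpr ⟨rfl, h⟩)

/-- Prefix-closure invariant: every nonempty "take" of an element is already in the set. -/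
def PC (st : List String) : Prop := ∀ v ∈ st, ∀ m, 1 ≤ m → strTake v m ∈ st

/-- Every element is a take of some string `≤ sub`. -/
def Cmp (st : List String) (sub : String) : Prop :=
  ∀ v ∈ st, ∃ u k, v = strTake u k ∧ u ≤ sub

theorem set_add_of_mem {α : Type} [BEq α] [LawfulBEq α] (t : PySem.Set α) (x : α) (h : x ∈ t) :
    PySem.Set.add t x = t := by
  unfold PySem.Set.add
  simp [h]

theorem set_add_of_not_mem {α : Type} [BEq α] [LawfulBEq α] (t : PySem.Set α) (x : α)
    (h : ¬ x ∈ t) : PySem.Set.add t x = t ++ [x] := by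
  unfold PySem.Set.add
  rw [if_neg]
  simp [h]

/-- Inner loop of A at a fixed suffix `sub`: adding `sub[:1], …, sub[:j]` preserves the invariants. -/
theorem inner_invariant (sub : String) (hsub : sub.toList ≠ []) :
    ∀ (j : Nat) (st : List String), st.Pairwise (· < ·) → PC st → Cmp st sub →
      ((List.range j).foldl (fun t k => PySem.Set.add t (strTake sub (k + 1))) st).Pairwise (· < ·) ∧
      PC ((List.range j).foldl (fun t k => PySem.Set.add t (strTake sub (k + 1))) st) ∧
      Cmp ((List.range j).foldl (fun t k => PySem.Set.add t (strTake sub (k + 1))) st) sub ∧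
      (∀ m, 1 ≤ m → m ≤ j →
        strTake sub m ∈ (List.range j).foldl (fun t k => PySem.Set.add t (strTake sub (k + 1))) st) ∧
      (∀ v ∈ st, v ∈ (List.range j).foldl (fun t k => PySem.Set.add t (strTake sub (k + 1))) st) := by
  intro j
  induction j with
  | zero =>
    intro st hp hpc hcmp
    exact ⟨hp, hpc, hcmp, fun m h1 h2 => by omega, fun v hv => hv⟩
  | succ j ih =>
    intro st hp hpc hcmp
    obtain ⟨hp', hpc', hcmp', hmem', hmono'⟩ := ih st hp hpc hcmp
    have hfold : (List.range (j + 1)).foldl (fun t k => PySem.Set.add t (strTake sub (k + 1))) st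
        = PySem.Set.add ((List.range j).foldl (fun t k => PySem.Set.add t (strTake sub (k + 1))) st)
            (strTake sub (j + 1)) := by
      rw [List.range_succ, List.foldl_append]; rfl
    set A := (List.range j).foldl (fun t k => PySem.Set.add t (strTake sub (k + 1))) st with hAdef
    rw [hfold]
    set w := strTake sub (j + 1) with hwdef
    have hwlen : 1 ≤ w.toList.length := by
      rw [hwdef, strTake_toList, List.length_take]
      have hpos : 0 < sub.toList.length := List.length_pos_iff.mpr hsub
      omega
    by_cases hw : w ∈ A
    · rw [set_add_of_mem A w hw]
      refine ⟨hp', hpc', hcmp', ?_, hmono'⟩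
      intro m h1 h2
      by_cases hmj : m ≤ j
      · exact hmem' m h1 hmj
      · have : m = j + 1 := by omega
        rw [this]; exact hw
    · rw [set_add_of_not_mem A w hw]
      have hlt : ∀ v ∈ A, v < w := by
        intro v hv
        obtain ⟨u, k, hvk, hu⟩ := hcmp' v hv
        have hvtl : v.toList = u.toList.take k := by rw [hvk, strTake_toList]
        rcases take_dichotomy u.toList sub.toList k (j + 1) (String.le_iff_toList_le.mp hu)
          with h | h
        · rw [String.lt_iff_toList_lt, hvtl, hwdef, strTake_toList]; exact h
        · exfalso
          have h' : w.toList <+: v.toList := by rw [hvtl, hwdef, strTake_toList]; exact h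
          have heq : strTake v w.toList.length = w := by
            apply String.toList_inj.mp
            rw [strTake_toList]
            exact (List.prefix_iff_eq_take.mp h').symm
          have := hpc' v hv w.toList.length hwlen
          rw [heq] at this
          exact hw this
      refine ⟨?_, ?_, ?_, ?_, ?_⟩
      · rw [List.pairwise_append]
        exact ⟨hp', List.pairwise_singleton _ _, fun v hv y hy => by
          rw [List.mem_singleton.mp hy]; exact hlt v hv⟩
      · intro v hv m hm
        rcases List.mem_append.mp hv with hvA | hvw
        · exact List.mem_append.mpr (Or.inl (hpc' v hvA m hm))
        · rw [List.mem_singleton.mp hvw]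
          by_cases hmj : m ≤ j
          · have hts : strTake w m = strTake sub m := by
              apply String.toList_inj.mp
              simp only [hwdef, strTake_toList, List.take_take]
              congr 1; omega
            rw [hts]
            exact List.mem_append.mpr (Or.inl (hmem' m hm hmj))
          · have hts : strTake w m = w := by
              apply String.toList_inj.mp
              simp only [hwdef, strTake_toList, List.take_take]
              congr 1; omega
            rw [hts]
            exact List.mem_append.mpr (Or.inr (List.mem_singleton.mpr rfl))
      · intro v hv
        rcases List.mem_append.mp hv with hvA | hvw
        · exact hcmp' v hvA
        · exact ⟨sub, j + 1, List.mem_singleton.mp hvw, le_rfl⟩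
      · intro m h1 h2
        by_cases hmj : m ≤ j
        · exact List.mem_append.mpr (Or.inl (hmem' m h1 hmj))
        · have : m = j + 1 := by omega
          rw [this]
          exact List.mem_append.mpr (Or.inr (List.mem_singleton.mpr rfl))
      · intro v hv
        exact List.mem_append.mpr (Or.inl (hmono' v hv))

/-- Outer loop of A: folding the inner loop over a `≤`-sorted list of nonempty suffix strings
keeps the accumulated set strictly increasing. -/
theorem outer_invariant (j : Nat) :
    ∀ (subs : List String) (st : List String), (∀ t ∈ subs, t.toList ≠ []) →
      subs.Pairwise (· ≤ ·) → st.Pairwise (· < ·) → PC st →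
      (∀ v ∈ st, ∃ u k, v = strTake u k ∧ ∀ t ∈ subs, u ≤ t) →
      (subs.foldl (fun st sub =>
        (List.range j).foldl (fun t k => PySem.Set.add t (strTake sub (k + 1))) st) st).Pairwise
        (· < ·) := by
  intro subs
  induction subs with
  | nil => intro st _ _ hp _ _; exact hp
  | cons sub rest ih =>
    intro st hne hsorted hp hpc hcmp
    obtain ⟨hhead, htail⟩ := List.pairwise_cons.mp hsorted
    have hnil : sub.toList ≠ [] := hne sub (List.mem_cons_self)
    have hcmp0 : Cmp st sub := by
      intro v hv
      obtain ⟨u, k, h1, h2⟩ := hcmp v hv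
      exact ⟨u, k, h1, h2 sub (List.mem_cons_self)⟩
    obtain ⟨hp1, hpc1, hcmp1, -, -⟩ := inner_invariant sub hnil j st hp hpc hcmp0
    rw [List.foldl_cons]
    apply ih _ (fun t ht => hne t (List.mem_cons_of_mem _ ht)) htail hp1 hpc1
    intro v hv
    obtain ⟨u, k, h1, h2⟩ := hcmp1 v hv
    exact ⟨u, k, h1, fun t ht => le_trans h2 (hhead t ht)⟩

/-- The paired fold of A's loop body (output list, seen set) stays on the diagonal and both
components are the plain `Set.add` fold. -/
theorem pair_fold {ι : Type} (f : ι → String) :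
    ∀ (l : List ι) (a : PySem.Set String),
      (l.foldl (fun st2 i =>
          if PySem.Set.contains st2.2 (f i) then st2
          else (st2.1 ++ [f i], PySem.Set.add st2.2 (f i))) (a, a))
        = (l.foldl (fun t i => PySem.Set.add t (f i)) a,
           l.foldl (fun t i => PySem.Set.add t (f i)) a) := by
  intro l
  induction l with
  | nil => intro a; rfl
  | cons x xs ih =>
    intro a
    by_cases h : f x ∈ a
    · simp only [List.foldl_cons, (PySem.Set.contains_iff a (f x)).mpr h, if_pos,
        set_add_of_mem a (f x) h]
      exact ih a
    · have hc : PySem.Set.contains a (f x) = false := by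
        rw [← Bool.not_eq_true, PySem.Set.contains_iff]
        exact h
      simp only [List.foldl_cons, hc, Bool.false_eq_true, if_neg, not_false_iff,
        set_add_of_not_mem a (f x) h]
      exact ih (a ++ [f x])

/-- The whole of A's loop: a diagonal pair fold over the suffix list is the nested `Set.add` fold. -/
theorem outer_pair (n : Nat) (f : String → Nat → String) :
    ∀ (subs : List String) (a : PySem.Set String),
      (subs.foldl (fun st sub => (List.range n).foldl (fun st2 k =>
          if PySem.Set.contains st2.2 (f sub k) then st2
          else (st2.1 ++ [f sub k], PySem.Set.add st2.2 (f sub k))) st) (a, a))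
        = (subs.foldl (fun t sub =>
             (List.range n).foldl (fun t2 k => PySem.Set.add t2 (f sub k)) t) a,
           subs.foldl (fun t sub =>
             (List.range n).foldl (fun t2 k => PySem.Set.add t2 (f sub k)) t) a) := by
  intro subs
  induction subs with
  | nil => intro a; rfl
  | cons sub rest ih =>
    intro a
    rw [List.foldl_cons, pair_fold (f sub) (List.range n) a, List.foldl_cons]
    exact ih _

/-- Folding `Set.add` over a nested generation is folding it over the flattened list. -/
theorem fold_add_flatMap {α β : Type} [BEq β] (c : α → List β) :
    ∀ (l : List α) (st : PySem.Set β),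
      l.foldl (fun t x => (c x).foldl PySem.Set.add t) st = (l.flatMap c).foldl PySem.Set.add st := by
  intro l
  induction l with
  | nil => intro st; rfl
  | cons x xs ih => intro st; simp only [List.foldl_cons, List.flatMap_cons, List.foldl_append]; exact ih _

theorem slice_to_succ (sub : String) (k : Nat) :
    PySem.Str.slice sub none (some ((k : Int) + 1)) = strTake sub (k + 1) := by
  have h : ((k : Int) + 1) = ((k + 1 : Nat) : Int) := by push_cast; ring
  rw [h, slice_to_eq_strTake]

/-- The sorted list of suffixes A builds. -/
def sufsSorted (s : String) : List String :=
  PySem.List.sorted ((List.range s.toList.length).map (fun k => strDrop s k)) (fun x => x)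

/-- A's candidate prefixes, flattened in generation order. -/
def candsA (s : String) : List String :=
  (sufsSorted s).flatMap (fun sub =>
    (List.range s.toList.length).map (fun k => strTake sub (k + 1)))

theorem slice_both (s : String) (a b : Nat) :
    PySem.Str.slice s (some (a : Int)) (some (b : Int))
      = String.ofList ((s.toList.drop a).take (b - a)) := by
  apply String.toList_inj.mp
  simp [PySem.Str.toList_slice, PySem.Chars.slice_eq_listSlice, PySem.List.slice_natCast]

theorem strTake_strDrop (s : String) (p m : Nat) :
    strTake (strDrop s p) m = String.ofList ((s.toList.drop p).take m) := by
  simp [strTake, strDrop_toList]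

theorem it_eq_fold (s : String) :
    it s = (sufsSorted s).foldl
      (fun t sub => (List.range s.toList.length).foldl
        (fun t2 k => PySem.Set.add t2 (strTake sub (k + 1))) t) [] := by
  unfold sufsSorted
  unfold it
  simp only [PySem.Str.len_eq, PySem.List.pyRange_zero_natCast, List.map_map,
    Function.comp_def, slice_from_eq_strDrop, PySem.List.length_sorted, List.length_map,
    List.length_range, List.foldl_map, slice_to_succ, PySem.Set.empty]
  rw [outer_pair s.toList.length (fun sub k => strTake sub (k + 1))]

theorem it_eq_ofList (s : String) : it s = PySem.Set.ofList (candsA s) := by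
  rw [it_eq_fold, PySem.Set.ofList_eq_foldl, candsA, ← fold_add_flatMap]
  simp only [List.foldl_map]

theorem it_pairwise (s : String) : (it s).Pairwise (· < ·) := by
  rw [it_eq_fold]
  apply outer_invariant
  · intro t ht
    rw [sufsSorted, PySem.List.mem_sorted] at ht
    obtain ⟨k, hk, rfl⟩ := List.mem_map.mp ht
    rw [strDrop_toList]
    intro hcon
    rw [List.drop_eq_nil_iff] at hcon
    have := List.mem_range.mp hk
    omega
  · have := PySem.List.sorted_pairwise
      ((List.range s.toList.length).map (fun k => strDrop s k)) (fun x : String => x)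
    simpa [sufsSorted] using this
  · exact List.Pairwise.nil
  · intro v hv; exact absurd hv (List.not_mem_nil)
  · intro v hv; exact absurd hv (List.not_mem_nil)

theorem mem_it_iff (s : String) (x : String) :
    x ∈ it s ↔ ∃ i j : Nat, i < s.toList.length ∧ i + 1 ≤ j ∧ j ≤ s.toList.length ∧
      x = String.ofList ((s.toList.drop i).take (j - i)) := by
  rw [it_eq_ofList, PySem.Set.mem_ofList, candsA, List.mem_flatMap]
  constructor
  · rintro ⟨sub, hsub, hx⟩
    rw [sufsSorted, PySem.List.mem_sorted] at hsub
    obtain ⟨p, hp, rfl⟩ := List.mem_map.mp hsub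
    rw [List.mem_range] at hp
    obtain ⟨k, hk, rfl⟩ := List.mem_map.mp hx
    rw [List.mem_range] at hk
    refine ⟨p, p + min (k + 1) (s.toList.length - p), hp, by omega, by omega, ?_⟩
    rw [strTake_strDrop]
    congr 1
    have hlen : (s.toList.drop p).length = s.toList.length - p := by rw [List.length_drop]
    by_cases hc : k + 1 ≤ s.toList.length - p
    · congr 1; omega
    · have hmin : p + min (k + 1) (s.toList.length - p) - p = s.toList.length - p := by omega
      rw [hmin, ← hlen, List.take_length]
      exact List.take_of_length_le (by omega)
  · rintro ⟨a, b, h1, h2, h3, rfl⟩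
    refine ⟨strDrop s a, ?_, ?_⟩
    · rw [sufsSorted, PySem.List.mem_sorted]
      exact List.mem_map.mpr ⟨a, List.mem_range.mpr h1, rfl⟩
    · apply List.mem_map.mpr
      refine ⟨b - a - 1, List.mem_range.mpr (by omega), ?_⟩
      rw [strTake_strDrop]
      congr 2
      omega

theorem mem_candsB_iff (s : String) (x : String) :
    x ∈ PySem.Set.ofList ((PySem.List.pyRange 0 (PySem.Str.len s)).flatMap (fun i =>
        (PySem.List.pyRange (i + 1) (PySem.Str.len s + 1)).map
          (fun j => PySem.Str.slice s (some i) (some j)))) ↔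
    ∃ i j : Nat, i < s.toList.length ∧ i + 1 ≤ j ∧ j ≤ s.toList.length ∧
      x = String.ofList ((s.toList.drop i).take (j - i)) := by
  rw [PySem.Set.mem_ofList, List.mem_flatMap]
  constructor
  · rintro ⟨i, hi, hx⟩
    rw [PySem.List.mem_pyRange_one, PySem.Str.len_eq] at hi
    obtain ⟨j, hj, rfl⟩ := List.mem_map.mp hx
    rw [PySem.List.mem_pyRange_one, PySem.Str.len_eq] at hj
    refine ⟨i.toNat, j.toNat, by omega, by omega, by omega, ?_⟩
    rw [show i = ((i.toNat : Nat) : Int) from (Int.toNat_of_nonneg (by omega)).symm,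
      show j = ((j.toNat : Nat) : Int) from (Int.toNat_of_nonneg (by omega)).symm, slice_both,
      Int.toNat_natCast, Int.toNat_natCast]
  · rintro ⟨a, b, h1, h2, h3, rfl⟩
    refine ⟨(a : Int), ?_, ?_⟩
    · rw [PySem.List.mem_pyRange_one, PySem.Str.len_eq]
      constructor <;> [positivity; exact_mod_cast h1]
    · apply List.mem_map.mpr
      refine ⟨(b : Int), ?_, ?_⟩
      · rw [PySem.List.mem_pyRange_one, PySem.Str.len_eq]
        omega
      · rw [slice_both]

-- ===== VERDICT (by name: the statement is the Claim_ definition above) =====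
theorem it_spec : Claim_equal_it := by
  intro s _
  unfold Spec_it
  simp only [it_alt]
  have hperm : (it s).Perm (PySem.Set.ofList
      ((PySem.List.pyRange 0 (PySem.Str.len s)).flatMap (fun i =>
        (PySem.List.pyRange (i + 1) (PySem.Str.len s + 1)).map
          (fun j => PySem.Str.slice s (some i) (some j))))) := by
    rw [List.perm_ext_iff_of_nodup (by rw [it_eq_ofList]; exact PySem.Set.nodup_ofList _)
      (PySem.Set.nodup_ofList _)]
    intro a
    rw [mem_it_iff, mem_candsB_iff]
  have hpair : (it s).Pairwise (fun a b => (fun x : String => x) a < (fun x : String => x) b) := by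
    simpa using it_pairwise s
  exact (PySem.List.sorted_eq_of_perm_of_pairwise_lt _ _ _ hperm hpair).symm
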